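-- pv_equiv track=rewrite | github.com/Eulala/BugFixEfficiency | BugFixEfficiency/util.py | calcu_prefix_sum_b
-- ===== SOURCE A (Python) =====
-- def calcu_prefix_sum_b(data):
--     if len(data) == 0:
--         return [], [], []
--     pos = [0] * len(data)
--     neg = [0] * len(data)
--     neu = [0] * len(data)
--     for i in range(len(data)):
--         if data[i][1] == 'pos':
--             pos[i] = 1
--         elif data[i][1] == 'neg':
--             neg[i] = 1
--         else:
--             neu[i] = 1
--     sum_p = [0] * len(data)
--     sum_n = [0] * len(data)
--     sum_u = [0] * len(data)
--     sum_p[0] = pos[0]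
--     sum_n[0] = neg[0]
--     sum_u[0] = neu[0]
--     for i in range(1, len(pos)):
--         sum_p[i] = sum_p[i - 1] + pos[i]
--         sum_n[i] = sum_n[i - 1] + neg[i]
--         sum_u[i] = sum_u[i-1] + neu[i]
--     return sum_p, sum_n, sum_u
-- ===== SOURCE B (Python) =====
-- def calcu_prefix_sum_b(data):
--     cp = cn = cu = 0
--     sum_p, sum_n, sum_u = [], [], []
--     for _, label in data:
--         if label == 'pos':
--             cp += 1
--         elif label == 'neg':
--             cn += 1
--         else:
--             cu += 1
--         sum_p.append(cp)
--         sum_n.append(cn)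
--         sum_u.append(cu)
--     return sum_p, sum_n, sum_u
-- ===== Notes on version B (the rewrite author's own statement) =====
-- stated objective: simpler
-- what changed: Replaces the build-indicator-arrays-then-prefix-sum two-phase construction (and the empty-input special case) with a single pass maintaining three scalar running counters appended to the result lists.
import Mathlib
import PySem

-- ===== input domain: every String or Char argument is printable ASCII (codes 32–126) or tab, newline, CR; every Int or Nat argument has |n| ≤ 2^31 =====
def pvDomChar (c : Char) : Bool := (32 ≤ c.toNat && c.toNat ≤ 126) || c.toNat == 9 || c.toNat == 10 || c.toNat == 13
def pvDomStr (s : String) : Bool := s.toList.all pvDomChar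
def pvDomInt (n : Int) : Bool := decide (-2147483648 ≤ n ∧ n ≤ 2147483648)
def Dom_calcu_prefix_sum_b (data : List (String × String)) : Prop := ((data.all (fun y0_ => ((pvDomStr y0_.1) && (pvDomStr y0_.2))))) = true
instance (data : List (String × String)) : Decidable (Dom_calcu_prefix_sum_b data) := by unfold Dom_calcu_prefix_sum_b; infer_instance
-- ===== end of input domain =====

-- B replaces A's two-phase indicator-array + prefix-sum construction (with its empty-input
-- special case) by a single accumulating pass over the data with three scalar counters (simpler).

-- ===== PORT A =====
-- the prefix-sum loop of A: sum[0] = xs[0], sum[i] = sum[i-1] + xs[i]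
def pvPrefixA (acc : Int) : List Int → List Int
  | [] => []
  | x :: r => (acc + x) :: pvPrefixA (acc + x) r

def calcu_prefix_sum_b (data : List (String × String)) : List Int × List Int × List Int :=
  if data.length = 0 then ([], [], []) else
    -- the indicator loop (if/elif/else), one indicator array per label
    let pos := data.map (fun x => if x.2 == "pos" then (1 : Int) else 0)
    let neg := data.map (fun x => if x.2 == "pos" then (0 : Int) else if x.2 == "neg" then 1 else 0)
    let neu := data.map (fun x => if x.2 == "pos" then (0 : Int) else if x.2 == "neg" then 0 else 1)
    (pvPrefixA 0 pos, pvPrefixA 0 neg, pvPrefixA 0 neu)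

-- ===== PORT B =====
-- single pass; state = (cp, cn, cu, sum_p, sum_n, sum_u)
def pvStepB (st : Int × Int × Int × List Int × List Int × List Int) (x : String × String) :
    Int × Int × Int × List Int × List Int × List Int :=
  let (cp, cn, cu, sp, sn, su) := st
  let (cp', cn', cu') :=
    if x.2 == "pos" then (cp + 1, cn, cu)
    else if x.2 == "neg" then (cp, cn + 1, cu)
    else (cp, cn, cu + 1)
  (cp', cn', cu', sp ++ [cp'], sn ++ [cn'], su ++ [cu'])

def calcu_prefix_sum_b_alt (data : List (String × String)) : List Int × List Int × List Int :=
  let (_, _, _, sp, sn, su) := data.foldl pvStepB (0, 0, 0, [], [], [])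
  (sp, sn, su)

-- ===== PRECONDITION & SPEC =====
def Spec_calcu_prefix_sum_b (data : List (String × String)) (out : List Int × List Int × List Int) : Prop := out = calcu_prefix_sum_b_alt data
instance (data : List (String × String)) (out : List Int × List Int × List Int) : Decidable (Spec_calcu_prefix_sum_b data out) := by unfold Spec_calcu_prefix_sum_b; infer_instance

-- ===== CLAIM (what is proved, stated in full; the proofs are below) =====
def Claim_equal_calcu_prefix_sum_b : Prop := ∀ (data : List (String × String)), Dom_calcu_prefix_sum_b data → Spec_calcu_prefix_sum_b data (calcu_prefix_sum_b data)

-- ===== LEMMAS AND PROOFS =====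

lemma foldB_eq (data : List (String × String)) :
    ∀ (cp cn cu : Int) (sp sn su : List Int), ∃ cp' cn' cu',
      data.foldl pvStepB (cp, cn, cu, sp, sn, su) =
        (cp', cn', cu',
         sp ++ pvPrefixA cp (data.map (fun x => if x.2 == "pos" then (1 : Int) else 0)),
         sn ++ pvPrefixA cn (data.map (fun x => if x.2 == "pos" then (0 : Int) else if x.2 == "neg" then 1 else 0)),
         su ++ pvPrefixA cu (data.map (fun x => if x.2 == "pos" then (0 : Int) else if x.2 == "neg" then 0 else 1))) := by
  induction data with
  | nil => intro cp cn cu sp sn su; exact ⟨cp, cn, cu, by simp [pvPrefixA]⟩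
  | cons x r ih =>
    intro cp cn cu sp sn su
    by_cases hp : x.2 = "pos"
    · obtain ⟨a, b, c, h⟩ := ih (cp + 1) cn cu (sp ++ [cp + 1]) (sn ++ [cn]) (su ++ [cu])
      exact ⟨a, b, c, by simp [List.foldl, pvStepB, beq_iff_eq, hp, h, pvPrefixA]⟩
    · by_cases hn : x.2 = "neg"
      · obtain ⟨a, b, c, h⟩ := ih cp (cn + 1) cu (sp ++ [cp]) (sn ++ [cn + 1]) (su ++ [cu])
        exact ⟨a, b, c, by simp [List.foldl, pvStepB, beq_iff_eq, hp, hn, h, pvPrefixA]⟩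
      · obtain ⟨a, b, c, h⟩ := ih cp cn (cu + 1) (sp ++ [cp]) (sn ++ [cn]) (su ++ [cu + 1])
        exact ⟨a, b, c, by simp [List.foldl, pvStepB, beq_iff_eq, hp, hn, h, pvPrefixA]⟩

-- ===== VERDICT (by name: the statement is the Claim_ definition above) =====
theorem calcu_prefix_sum_b_spec : Claim_equal_calcu_prefix_sum_b := by
  intro data _
  unfold Spec_calcu_prefix_sum_b calcu_prefix_sum_b calcu_prefix_sum_b_alt
  obtain ⟨a, b, c, h⟩ := foldB_eq data 0 0 0 [] [] []
  cases data with
  | nil => simp [pvPrefixA]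
  | cons x r => simp [h]
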